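-- pv_equiv track=rewrite | github.com/sgolts/hypertaxis | notebooks/utilities/hypercore.py | prepare_for_hypercore_decomp
-- ===== SOURCE A (Python) =====
-- import itertools
--
-- def prepare_for_hypercore_decomp(data, k=1):
--     """Prepares interaction data for hypercore decomposition.
--
--     Performs filtering, sorting, and duplicate removal to ensure data is suitable for
--     identifying hypercores with a minimum degree of 'k'.
--
--     Args:
--         data (list): A list of interactions, where each interaction is a list of nodes.
--         k (int, optional): The minimum interaction size for inclusion. Defaults to 1.
--
--     Returns:
--         list: The processed list of unique, sorted interactions, ready for hypercore analysis.
--     """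
--
--     # Filter out interactions smaller than 'k'
--     filtered_data = [interaction for interaction in data if len(interaction) > k]
--
--     # Sort each interaction's nodes
--     for interaction in filtered_data:
--         interaction.sort()
--
--     # Sort the interactions themselves
--     filtered_data.sort()
--
--     # Remove duplicate interactions
--     unique_data = list(k for k, _ in itertools.groupby(filtered_data))
--
--     # Sort by interaction length
--     unique_data.sort(key=len)
--
--     return unique_data
-- ===== SOURCE B (Python) =====
-- def prepare_for_hypercore_decomp(data, k=1):
--     # Filter out interactions smaller than 'k'
--     filtered = [interaction for interaction in data if len(interaction) > k]
--
--     # Sort each interaction's nodes (in place, as the original does)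
--     for interaction in filtered:
--         interaction.sort()
--
--     # Hash-based dedup: keep the first occurrence of each interaction
--     seen = set()
--     unique = []
--     for interaction in filtered:
--         t = tuple(interaction)
--         if t not in seen:
--             seen.add(t)
--             unique.append(interaction)
--
--     # One sort by (length, lexicographic) reproduces the final order
--     unique.sort(key=lambda x: (len(x), x))
--     return unique
-- ===== Notes on version B (the rewrite author's own statement) =====
-- stated objective: idiomatic
-- what changed: Replaces the full lexicographic sort + itertools.groupby adjacent-dedup + second stable sort by length with a single-pass hash-set dedup of first occurrences followed by one sort with key (len(x), x).
import Mathlib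
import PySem

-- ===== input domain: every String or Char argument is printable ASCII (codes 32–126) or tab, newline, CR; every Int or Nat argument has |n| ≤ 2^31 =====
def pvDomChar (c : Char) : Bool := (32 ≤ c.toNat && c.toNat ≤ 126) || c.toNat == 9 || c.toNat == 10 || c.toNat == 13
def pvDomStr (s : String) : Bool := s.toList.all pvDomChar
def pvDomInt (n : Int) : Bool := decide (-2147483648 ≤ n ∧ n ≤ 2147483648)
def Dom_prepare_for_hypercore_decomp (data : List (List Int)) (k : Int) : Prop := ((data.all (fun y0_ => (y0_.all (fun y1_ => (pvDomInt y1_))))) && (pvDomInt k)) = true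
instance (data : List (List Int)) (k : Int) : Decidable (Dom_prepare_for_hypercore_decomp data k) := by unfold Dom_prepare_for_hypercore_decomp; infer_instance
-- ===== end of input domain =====

-- B replaces A's lex-sort + groupby adjacent-dedup + stable length sort by a one-pass
-- hash-set first-occurrence dedup followed by a single sort keyed by (len, lex); both
-- sort the argument's sublists in place (return-value equivalence; the mutation is identical).


-- ===== PORT A =====
-- 'list(key for key, _ in itertools.groupby(l))' = the run keys of l, i.e. l with
-- consecutive duplicates removed (exact: groupby groups maximal runs of equal elements).
def pvGroupKeys (l : List (List Int)) : List (List Int) :=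
  match l with
  | [] => []
  | [x] => [x]
  | x :: y :: t => if x = y then pvGroupKeys (y :: t) else x :: pvGroupKeys (y :: t)

def prepare_for_hypercore_decomp (data : List (List Int)) (k : Int) : List (List Int) :=
  -- filtered_data = [interaction for interaction in data if len(interaction) > k]
  let filtered0 := data.filter (fun interaction => decide (k < (interaction.length : Int)))
  -- for interaction in filtered_data: interaction.sort()
  let filtered1 := filtered0.map (fun interaction => PySem.List.sorted interaction (fun x => x) false)
  -- filtered_data.sort()
  let filtered2 := PySem.List.sorted filtered1 (fun x => x) false
  -- unique_data = list(k for k, _ in itertools.groupby(filtered_data))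
  let unique_data := pvGroupKeys filtered2
  -- unique_data.sort(key=len)
  PySem.List.sorted unique_data (fun x => (x.length : Int)) false

-- ===== PORT B =====
def prepare_for_hypercore_decomp_alt (data : List (List Int)) (k : Int) : List (List Int) :=
  let filtered0 := data.filter (fun interaction => decide (k < (interaction.length : Int)))
  let filtered1 := filtered0.map (fun interaction => PySem.List.sorted interaction (fun x => x) false)
  -- seen = set(); unique = []; for x in filtered: if tuple(x) not in seen: seen.add; unique.append
  let st := filtered1.foldl
    (fun (p : PySem.Set (List Int) × List (List Int)) x =>
      if PySem.Set.contains p.1 x then p else (PySem.Set.add p.1 x, p.2 ++ [x]))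
    (PySem.Set.empty, [])
  -- unique.sort(key=lambda x: (len(x), x))
  PySem.List.sorted2 st.2 (fun x => (x.length : Int)) (fun x => x) false

-- ===== PRECONDITION & SPEC =====
def Spec_prepare_for_hypercore_decomp (data : List (List Int)) (k : Int) (out : List (List Int)) : Prop := out = prepare_for_hypercore_decomp_alt data k
instance (data : List (List Int)) (k : Int) (out : List (List Int)) : Decidable (Spec_prepare_for_hypercore_decomp data k out) := by unfold Spec_prepare_for_hypercore_decomp; infer_instance

-- ===== CLAIM (what is proved, stated in full; the proofs are below) =====
def Claim_equal_prepare_for_hypercore_decomp : Prop := ∀ (data : List (List Int)) (k : Int), Dom_prepare_for_hypercore_decomp data k → Spec_prepare_for_hypercore_decomp data k (prepare_for_hypercore_decomp data k)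

-- ===== LEMMAS AND PROOFS =====

-- The strict "length, then lexicographic" comparison both final sorts realise.
def pvS (a b : List Int) : Prop :=
  ((a.length : Int) < (b.length : Int)) ∨ (¬ ((b.length : Int) < (a.length : Int)) ∧ a < b)

theorem pvS_trans {a b c : List Int} (h1 : pvS a b) (h2 : pvS b c) : pvS a c := by
  rcases h1 with h1 | ⟨h1, h1'⟩ <;> rcases h2 with h2 | ⟨h2, h2'⟩
  · exact Or.inl (lt_trans h1 h2)
  · exact Or.inl (by omega)
  · exact Or.inl (by omega)
  · exact Or.inr ⟨by omega, lt_trans h1' h2'⟩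

theorem pvS_resolve {a b : List Int} (hne : a ≠ b) (h : ¬ pvS a b) : pvS b a := by
  by_cases hl : (b.length : Int) < (a.length : Int)
  · exact Or.inl hl
  · rcases lt_trichotomy a b with h3 | h3 | h3
    · exact absurd (Or.inr ⟨hl, h3⟩) h
    · exact absurd h3 hne
    · exact Or.inr ⟨fun hab => h (Or.inl hab), h3⟩

theorem pvS_asymm {a b : List Int} (h1 : pvS a b) (h2 : pvS b a) : False := by
  rcases h1 with h1 | ⟨h1, h1'⟩ <;> rcases h2 with h2 | ⟨h2, h2'⟩
  · omega
  · omega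
  · omega
  · exact absurd h2' (lt_asymm h1')

-- B's (seen, unique) pair: both components evolve as the same PySem.Set fold.
theorem pvPairFold (l : List (List Int)) (s : List (List Int)) :
    l.foldl (fun (p : PySem.Set (List Int) × List (List Int)) x =>
        if PySem.Set.contains p.1 x then p else (PySem.Set.add p.1 x, p.2 ++ [x])) (s, s)
      = (l.foldl PySem.Set.add s, l.foldl PySem.Set.add s) := by
  induction l generalizing s with
  | nil => rfl
  | cons x t ih =>
    simp only [List.foldl_cons]
    by_cases h : PySem.Set.contains s x
    · have hm : x ∈ s := by simpa using h
      have hadd : PySem.Set.add s x = s := by simp [PySem.Set.add, hm]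
      simp only [h, if_true, hadd, ih]
    · have hm : x ∉ s := by simpa using h
      have hadd : PySem.Set.add s x = s ++ [x] := by simp [PySem.Set.add, hm]
      simp only [h, if_false, Bool.false_eq_true]
      rw [show (PySem.Set.add s x, s ++ [x]) = (PySem.Set.add s x, PySem.Set.add s x) from by rw [hadd], ih]

-- pvGroupKeys preserves membership.
theorem pvGroupKeys_mem (l : List (List Int)) (x : List Int) :
    x ∈ pvGroupKeys l ↔ x ∈ l := by
  induction l using pvGroupKeys.induct with
  | case1 => simp [pvGroupKeys]
  | case2 y => simp [pvGroupKeys]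
  | case3 y t ih => simp only [pvGroupKeys]; simp [ih]
  | case4 a y t h ih => simp [pvGroupKeys, if_neg h, ih]

-- On a (≤)-sorted list, removing consecutive duplicates yields a strictly increasing list.
theorem pvGroupKeys_pairwise (l : List (List Int)) (hl : l.Pairwise (· ≤ ·)) :
    (pvGroupKeys l).Pairwise (· < ·) := by
  induction l using pvGroupKeys.induct with
  | case1 => simp [pvGroupKeys]
  | case2 y => simp [pvGroupKeys]
  | case3 y t ih =>
    simp only [pvGroupKeys]
    exact ih hl.tail
  | case4 a y t h ih =>
    simp only [pvGroupKeys, if_neg h]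
    refine List.pairwise_cons.mpr ⟨?_, ih hl.tail⟩
    intro z hz
    have hzmem : z ∈ y :: t := (pvGroupKeys_mem _ _).mp hz
    have hay : a ≤ y := (List.pairwise_cons.mp hl).1 y (by simp)
    have halt : a < y := lt_of_le_of_ne hay h
    rcases List.mem_cons.mp hzmem with rfl | hzt
    · exact halt
    · have hyz : y ≤ z := (List.pairwise_cons.mp hl.tail).1 z hzt
      exact lt_of_lt_of_le halt hyz

-- Stability of one insertBy step of A's final length sort:
-- S is "length strictly smaller, or lengths equal and R".
theorem pvInsertBy_stable (R : List Int → List Int → Prop)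
    (x : List Int) (acc : List (List Int))
    (hacc : acc.Pairwise (fun a b => (a.length : Int) < (b.length : Int) ∨ ((a.length : Int) = (b.length : Int) ∧ R a b)))
    (hx : ∀ y ∈ acc, R y x) :
    (PySem.List.insertBy (fun a b => decide ((a.length : Int) < (b.length : Int))) x acc).Pairwise
      (fun a b => (a.length : Int) < (b.length : Int) ∨ ((a.length : Int) = (b.length : Int) ∧ R a b)) := by
  induction acc with
  | nil => simp [PySem.List.insertBy]
  | cons y ys ih =>
    simp only [PySem.List.insertBy]
    by_cases h : (x.length : Int) < (y.length : Int)
    · simp only [h, decide_true, if_true]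
      refine List.pairwise_cons.mpr ⟨?_, hacc⟩
      intro z hz
      rcases List.mem_cons.mp hz with rfl | hzt
      · exact Or.inl h
      · rcases (List.pairwise_cons.mp hacc).1 z hzt with h2 | ⟨h2, _⟩
        · exact Or.inl (by omega)
        · exact Or.inl (by omega)
    · simp only [h, decide_false, Bool.false_eq_true, if_false]
      refine List.pairwise_cons.mpr ⟨?_, ih hacc.tail (fun z hz => hx z (by simp [hz]))⟩
      intro z hz
      rcases (PySem.List.mem_insertBy _ _ _ _).mp hz with rfl | hzt
      · rcases lt_or_eq_of_le (not_lt.mp h) with h2 | h2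
        · exact Or.inl h2
        · exact Or.inr ⟨h2, hx y (by simp)⟩
      · exact (List.pairwise_cons.mp hacc).1 z hzt

-- Stability of the fold underlying A's final insertion sort by length.
theorem pvFold_stable (R : List Int → List Int → Prop)
    (ys : List (List Int)) (acc : List (List Int)) (hys : ys.Pairwise R)
    (hacc : acc.Pairwise (fun a b => (a.length : Int) < (b.length : Int) ∨ ((a.length : Int) = (b.length : Int) ∧ R a b)))
    (hcross : ∀ a ∈ acc, ∀ b ∈ ys, R a b) :
    (ys.foldl (fun acc x => PySem.List.insertBy (fun a b => decide ((a.length : Int) < (b.length : Int))) x acc) acc).Pairwise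
      (fun a b => (a.length : Int) < (b.length : Int) ∨ ((a.length : Int) = (b.length : Int) ∧ R a b)) := by
  induction ys generalizing acc with
  | nil => simpa using hacc
  | cons x t ih =>
    simp only [List.foldl_cons]
    refine ih _ hys.tail ?_ ?_
    · exact pvInsertBy_stable R x acc hacc (fun y hy => hcross y hy x (by simp))
    · intro a ha b hb
      rcases (PySem.List.mem_insertBy _ _ _ _).mp ha with rfl | hat
      · exact (List.pairwise_cons.mp hys).1 b hb
      · exact hcross a hat b (by simp [hb])

-- A's final sort: sorted-by-length of a (·<·)-chain is a pvS-chain.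
theorem pvSortedLen_pairwise (g : List (List Int)) (hg : g.Pairwise (· < ·)) :
    (PySem.List.sorted g (fun x => (x.length : Int)) false).Pairwise pvS := by
  have h := pvFold_stable (· < ·) g [] hg (by simp) (by simp)
  rw [PySem.List.sorted_eq_foldl_insertBy]
  refine h.imp ?_
  intro a b hab
  rcases hab with h1 | ⟨h1, h2⟩
  · exact Or.inl h1
  · exact Or.inr ⟨by omega, h2⟩

-- One insertBy step of B's (len, lex) sort keeps a pvS-chain, for pairwise-distinct input.
theorem pvInsertBy2_stable (x : List Int) (acc : List (List Int))
    (hacc : acc.Pairwise pvS) (hne : ∀ y ∈ acc, y ≠ x) :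
    (PySem.List.insertBy
      (fun a b => decide ((a.length : Int) < (b.length : Int)) ||
        (!decide ((b.length : Int) < (a.length : Int)) && decide (a < b))) x acc).Pairwise pvS := by
  induction acc with
  | nil => simp [PySem.List.insertBy]
  | cons y ys ih =>
    simp only [PySem.List.insertBy]
    by_cases h : pvS x y
    · have hb : (decide ((x.length : Int) < (y.length : Int)) ||
          (!decide ((y.length : Int) < (x.length : Int)) && decide (x < y))) = true := by
        rcases h with h | ⟨h1, h2⟩
        · simp [h]
        · simp only [Bool.or_eq_true, Bool.and_eq_true, Bool.not_eq_true', decide_eq_true_iff,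
            decide_eq_false_iff_not]
          exact Or.inr ⟨h1, h2⟩
      simp only [hb, if_true]
      refine List.pairwise_cons.mpr ⟨?_, hacc⟩
      intro z hz
      rcases List.mem_cons.mp hz with rfl | hzt
      · exact h
      · exact pvS_trans h ((List.pairwise_cons.mp hacc).1 z hzt)
    · have hb : (decide ((x.length : Int) < (y.length : Int)) ||
          (!decide ((y.length : Int) < (x.length : Int)) && decide (x < y))) = false := by
        by_cases h1 : (x.length : Int) < (y.length : Int)
        · exact absurd (Or.inl h1) h
        by_cases h2 : (y.length : Int) < (x.length : Int)
        · rw [decide_eq_false h1, decide_eq_true h2]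
          simp
        by_cases h3 : x < y
        · exact absurd (Or.inr ⟨h2, h3⟩) h
        · rw [decide_eq_false h1, decide_eq_false h2, decide_eq_false h3]
          simp
      simp only [hb, Bool.false_eq_true, if_false]
      refine List.pairwise_cons.mpr ⟨?_, ih hacc.tail (fun z hz => hne z (by simp [hz]))⟩
      intro z hz
      rcases (PySem.List.mem_insertBy _ _ _ _).mp hz with rfl | hzt
      · exact pvS_resolve (Ne.symm (hne y (by simp))) h
      · exact (List.pairwise_cons.mp hacc).1 z hzt

-- The fold underlying B's sort, on a duplicate-free input.
theorem pvFold2_stable (ys : List (List Int)) (acc : List (List Int))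
    (hys : ys.Nodup) (hacc : acc.Pairwise pvS)
    (hcross : ∀ a ∈ acc, ∀ b ∈ ys, a ≠ b) :
    (ys.foldl (fun acc x => PySem.List.insertBy
      (fun a b => decide ((a.length : Int) < (b.length : Int)) ||
        (!decide ((b.length : Int) < (a.length : Int)) && decide (a < b))) x acc) acc).Pairwise pvS := by
  induction ys generalizing acc with
  | nil => simpa using hacc
  | cons x t ih =>
    simp only [List.foldl_cons]
    refine ih _ hys.of_cons ?_ ?_
    · exact pvInsertBy2_stable x acc hacc (fun y hy => hcross y hy x (by simp))
    · intro a ha b hb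
      rcases (PySem.List.mem_insertBy _ _ _ _).mp ha with rfl | hat
      · intro heq
        exact (List.nodup_cons.mp hys).1 (heq ▸ hb)
      · exact hcross a hat b (by simp [hb])

-- B's sort of a duplicate-free list is a pvS-chain.
theorem pvSorted2_pairwise (xs : List (List Int)) (hnd : xs.Nodup) :
    (PySem.List.sorted2 xs (fun x => (x.length : Int)) (fun x => x) false).Pairwise pvS := by
  have hrfl : PySem.List.sorted2 xs (fun x => (x.length : Int)) (fun x => x) false
      = xs.foldl (fun acc x => PySem.List.insertBy
          (fun a b => decide ((a.length : Int) < (b.length : Int)) ||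
            (!decide ((b.length : Int) < (a.length : Int)) && decide (a < b))) x acc) [] := rfl
  rw [hrfl]
  exact pvFold2_stable xs [] hnd (by simp) (by simp)

-- The core identity, for any list m of already-sorted interactions.
theorem pvMain (m : List (List Int)) :
    PySem.List.sorted (pvGroupKeys (PySem.List.sorted m (fun x => x) false))
        (fun x => (x.length : Int)) false
      = PySem.List.sorted2
          ((m.foldl (fun (p : PySem.Set (List Int) × List (List Int)) x =>
              if PySem.Set.contains p.1 x then p else (PySem.Set.add p.1 x, p.2 ++ [x]))
            (PySem.Set.empty, [])).2)
          (fun x => (x.length : Int)) (fun x => x) false := by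
  have hW : (m.foldl (fun (p : PySem.Set (List Int) × List (List Int)) x =>
        if PySem.Set.contains p.1 x then p else (PySem.Set.add p.1 x, p.2 ++ [x]))
      (PySem.Set.empty, [])).2 = PySem.Set.ofList m := by
    rw [show (PySem.Set.empty, ([] : List (List Int)))
          = (([] : List (List Int)), ([] : List (List Int))) from rfl,
        pvPairFold, PySem.Set.ofList_eq_foldl]
  rw [hW]
  set s := PySem.List.sorted m (fun x => x) false with hsdef
  set g := pvGroupKeys s with hgdef
  -- the lexicographic sort of m is a (≤)-chain (bridging the DecidableLT instances)
  have hs : s.Pairwise (· ≤ ·) := by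
    have h := congrArg
      (fun d => @PySem.List.sorted (List Int) (List Int) List.instLT d m (fun x => x) false)
      (funext fun a => funext fun b =>
        (Subsingleton.elim (a.decidableLT b) (LinearOrder.toDecidableLT a b) :
          (fun a b => a.decidableLT b) a b = _))
    rw [hsdef, show PySem.List.sorted m (fun x => x) false
        = @PySem.List.sorted (List Int) (List Int) List.instLinearOrder.toLT
            LinearOrder.toDecidableLT m (fun x => x) false from h]
    exact PySem.List.sorted_pairwise m (fun x => x)
  have hg : g.Pairwise (· < ·) := pvGroupKeys_pairwise s hs
  have hg_nodup : g.Nodup := hg.imp (fun h => ne_of_lt h)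
  have hgperm : g.Perm (PySem.Set.ofList m) :=
    (List.perm_ext_iff_of_nodup hg_nodup (PySem.Set.nodup_ofList m)).mpr
      (fun a => by rw [hgdef, pvGroupKeys_mem, hsdef, PySem.List.mem_sorted, PySem.Set.mem_ofList])
  have h1 : (PySem.List.sorted g (fun x => (x.length : Int)) false).Pairwise pvS :=
    pvSortedLen_pairwise g hg
  have h2 : (PySem.List.sorted2 (PySem.Set.ofList m) (fun x => (x.length : Int)) (fun x => x) false).Pairwise pvS :=
    pvSorted2_pairwise _ (PySem.Set.nodup_ofList m)
  have hperm : (PySem.List.sorted g (fun x => (x.length : Int)) false).Perm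
      (PySem.List.sorted2 (PySem.Set.ofList m) (fun x => (x.length : Int)) (fun x => x) false) :=
    ((PySem.List.sorted_perm g (fun x => (x.length : Int)) false).trans hgperm).trans
      (PySem.List.sorted2_perm (PySem.Set.ofList m) (fun x => (x.length : Int)) (fun x => x) false).symm
  exact List.eq_of_perm_of_sorted
    (fun a b _ _ hab hba => absurd hba (fun hba => pvS_asymm hab hba)) h1 h2 hperm

-- ===== VERDICT (by name: the statement is the Claim_ definition above) =====
theorem prepare_for_hypercore_decomp_spec : Claim_equal_prepare_for_hypercore_decomp := by
  intro data k _
  unfold Spec_prepare_for_hypercore_decomp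
  unfold prepare_for_hypercore_decomp prepare_for_hypercore_decomp_alt
  exact pvMain _
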